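-- pv_equiv track=rewrite | github.com/wingedrasengan927/Data-Structures-and-Algorithms-in-Python | amazonOA/turnstile.py | getLeaveTime
-- ===== SOURCE A (Python) =====
-- from collections import deque
--
-- def getLeaveTime(incomingTime, direction):
--     '''
--     1. The idea is we separate the input into two queues, one for exit and one for enter
--     2. we maintain a time counter - currentTime which represents the current time
--     3. we process the enter and exit queues until they both are empty
--     4. we process the exit queue i.e we let the person who wants to exit pass if:
--         a. his time is less than or equal to the current time
--         b. the previous state of turnstile is 1 or -1
--         c. or the previous state of turnstile is 0 but the person in enter queue hasn't come yet
--         d. or enter queue is empty and exit queue is not empty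
--     5. if the above condition satisfies, we let the person leave first and update prevState
--     6. next checking the conditions of the enter queue, we let the person enter and update prevState
--     7. since we are already checking the conditions for the exit queue, we don't need to check all of them
--     for the enter queue
--     8. we update our currentTime after each step
--
--     '''
--     prevState = -1 # previous state of the turnstile
--     result = [0] * len(incomingTime)
--     exit = deque()
--     enter = deque()
--     i = 0
--     for time, dir in zip(incomingTime, direction):
--         if dir == 0:
--             enter.append([time, i])
--         else:
--             exit.append([time, i])
--         i += 1
--     currentTime = 0
--     while enter or exit:
--         if exit and exit[0][0] <= currentTime and ((prevState == -1 or prevState == 1) or \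
--         len(enter) == 0 or (enter[0][0] > currentTime and prevState == 0)):
--             val = exit.popleft()
--             result[val[1]] = currentTime
--             prevState = 1
--         elif len(enter) > 0 and enter[0][0] <= currentTime:
--             val = enter.popleft()
--             result[val[1]] = currentTime
--             prevState = 0
--         else:
--             # reset the prev State since nobody is there to pass through
--             prevState = -1
--
--         currentTime += 1
--
--     return result
-- ===== SOURCE B (Python) =====
-- def getLeaveTime(incomingTime, direction):
--     n = len(incomingTime)
--     result = [0] * n
--     enter = [(t, i) for i, (t, d) in enumerate(zip(incomingTime, direction)) if d == 0]
--     exits = [(t, i) for i, (t, d) in enumerate(zip(incomingTime, direction)) if d != 0]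
--     ei = xi = 0
--     prev = -1
--     cur = 0
--     while xi < len(exits) or ei < len(enter):
--         heads = [q[k][0] for q, k in ((exits, xi), (enter, ei)) if k < len(q)]
--         nxt = min(heads)
--         if nxt > cur:
--             # nobody has arrived yet: jump straight to the next arrival (idle resets the state)
--             prev, cur = -1, nxt
--         if xi < len(exits) and exits[xi][0] <= cur and (prev != 0 or ei == len(enter) or enter[ei][0] > cur):
--             result[exits[xi][1]] = cur
--             prev, xi = 1, xi + 1
--         else:
--             result[enter[ei][1]] = cur
--             prev, ei = 0, ei + 1
--         cur += 1
--     return result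
-- ===== Notes on version B (the rewrite author's own statement) =====
-- stated objective: alternative
-- what changed: Replaces A's tick-by-one while loop (one iteration per unit of time, with deque append/popleft) by an event-driven two-pointer loop over the enter/exit lists that serves exactly one person per iteration, jumping currentTime directly to the next arrival when nobody is waiting.
import Mathlib
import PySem

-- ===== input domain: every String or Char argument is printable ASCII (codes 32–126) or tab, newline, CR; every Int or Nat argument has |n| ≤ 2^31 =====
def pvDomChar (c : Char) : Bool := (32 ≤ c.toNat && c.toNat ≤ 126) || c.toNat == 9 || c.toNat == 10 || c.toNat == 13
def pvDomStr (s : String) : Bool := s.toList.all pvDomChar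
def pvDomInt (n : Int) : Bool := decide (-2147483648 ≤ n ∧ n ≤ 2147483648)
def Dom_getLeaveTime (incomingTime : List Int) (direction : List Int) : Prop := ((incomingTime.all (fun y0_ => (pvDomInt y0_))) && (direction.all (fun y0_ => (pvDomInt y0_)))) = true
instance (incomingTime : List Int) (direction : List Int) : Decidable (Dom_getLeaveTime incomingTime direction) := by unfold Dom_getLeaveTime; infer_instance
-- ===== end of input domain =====

-- B replaces A's tick-by-one time loop by an event-driven loop that jumps straight to the
-- next arrival when nobody is waiting: one iteration per person instead of one per time unit
-- (objective: alternative).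

-- minimum of the front arrival times of the two queues (0 when both are empty; never used then)
def minHead (ex en : List (Int × Int)) : Int :=
  match ex, en with
  | (t, _) :: _, (s, _) :: _ => min t s
  | (t, _) :: _, [] => t
  | [], (s, _) :: _ => s
  | [], [] => 0

-- ===== PORT A =====
-- A's queue-building loop: for (time, dir) in zip(...), append to enter/exit with index i
def buildQ : List (Int × Int) → Int → (List (Int × Int) × List (Int × Int))
  | [], _ => ([], [])
  | (t, d) :: rest, i =>
      let q := buildQ rest (i + 1)
      if d = 0 then (q.1, (t, i) :: q.2) else ((t, i) :: q.1, q.2)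

-- when no branch of A's loop body fires, every waiting person's time is still in the future
lemma idle_lt_minHead (ex en : List (Int × Int)) (prev cur : Int)
    (hne : ¬(ex = [] ∧ en = []))
    (h2 : ¬(ex ≠ [] ∧ (ex.headD (0, 0)).1 ≤ cur ∧
      ((prev = -1 ∨ prev = 1) ∨ en.length = 0 ∨ ((en.headD (0, 0)).1 > cur ∧ prev = 0))))
    (h3 : ¬(en ≠ [] ∧ (en.headD (0, 0)).1 ≤ cur))
    (hp : prev = -1 ∨ prev = 0 ∨ prev = 1) :
    cur < minHead ex en := by
  cases ex with
  | nil =>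
    cases en with
    | nil => exact absurd ⟨rfl, rfl⟩ hne
    | cons b tl => simp [minHead] at h3 ⊢; omega
  | cons a tl =>
    cases en with
    | nil => simp [minHead] at h2 ⊢; omega
    | cons b tl2 => simp [minHead] at h2 h3 ⊢; omega

-- A's while loop, ticking currentTime by 1 each iteration
def loopA (ex en : List (Int × Int)) (prev cur : Int) (res : List Int) : List Int :=
  if ex = [] ∧ en = [] then res
  else if ex ≠ [] ∧ (ex.headD (0, 0)).1 ≤ cur ∧
      ((prev = -1 ∨ prev = 1) ∨ en.length = 0 ∨ ((en.headD (0, 0)).1 > cur ∧ prev = 0)) then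
    loopA ex.tail en 1 (cur + 1) (res.set (ex.headD (0, 0)).2.toNat cur)
  else if en ≠ [] ∧ (en.headD (0, 0)).1 ≤ cur then
    loopA ex en.tail 0 (cur + 1) (res.set (en.headD (0, 0)).2.toNat cur)
  else
    loopA ex en (-1) (cur + 1) res
termination_by (ex.length + en.length,
  2 * (minHead ex en - cur).toNat + (if prev = -1 ∨ prev = 0 ∨ prev = 1 then 0 else 1))
decreasing_by
  · apply Prod.Lex.left
    cases ex with
    | nil => simp at *
    | cons a tl => simp
  · apply Prod.Lex.left
    cases en with
    | nil => simp at *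
    | cons a tl => simp
  · apply Prod.Lex.right
    by_cases hp : prev = -1 ∨ prev = 0 ∨ prev = 1
    · have hlt := idle_lt_minHead ex en prev cur ‹_› ‹_› ‹_› hp
      simp only [if_pos hp]
      norm_num
      omega
    · simp only [if_neg hp]
      norm_num
      omega

def getLeaveTime (incomingTime : List Int) (direction : List Int) : List Int :=
  let q := buildQ (incomingTime.zip direction) 0
  loopA q.1 q.2 (-1) 0 (List.replicate incomingTime.length 0)

-- ===== PORT B =====
-- B's event-driven loop: jump currentTime to the next arrival (resetting prevState) when
-- nobody has arrived yet, then serve exactly one person per iteration.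
def loopB (ex en : List (Int × Int)) (prev cur : Int) (res : List Int) : List Int :=
  if ex = [] ∧ en = [] then res
  else
    let cur' := if cur < minHead ex en then minHead ex en else cur
    let prev' := if cur < minHead ex en then -1 else prev
    if ex ≠ [] ∧ (ex.headD (0, 0)).1 ≤ cur' ∧
        (prev' ≠ 0 ∨ en = [] ∨ (en.headD (0, 0)).1 > cur') then
      loopB ex.tail en 1 (cur' + 1) (res.set (ex.headD (0, 0)).2.toNat cur')
    else
      match en with
      | [] => res   -- unreachable: the else branch always finds an arrived enter person
      | (_, i) :: tl => loopB ex tl 0 (cur' + 1) (res.set i.toNat cur')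
termination_by ex.length + en.length
decreasing_by
  · cases ex with
    | nil => simp at *
    | cons a tl => simp
  · simp

def getLeaveTime_alt (incomingTime : List Int) (direction : List Int) : List Int :=
  let pairs := PySem.List.enumerate (incomingTime.zip direction) 0
  let ex := pairs.filterMap (fun p => if p.2.2 = 0 then none else some (p.2.1, p.1))
  let en := pairs.filterMap (fun p => if p.2.2 = 0 then some (p.2.1, p.1) else none)
  loopB ex en (-1) 0 (List.replicate incomingTime.length 0)

-- ===== PRECONDITION & SPEC =====
def Spec_getLeaveTime (incomingTime : List Int) (direction : List Int) (out : List Int) : Prop := out = getLeaveTime_alt incomingTime direction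
instance (incomingTime : List Int) (direction : List Int) (out : List Int) : Decidable (Spec_getLeaveTime incomingTime direction out) := by unfold Spec_getLeaveTime; infer_instance

-- ===== CLAIM (what is proved, stated in full; the proofs are below) =====
def Claim_equal_getLeaveTime : Prop := ∀ (incomingTime : List Int) (direction : List Int), Dom_getLeaveTime incomingTime direction → Spec_getLeaveTime incomingTime direction (getLeaveTime incomingTime direction)

-- ===== LEMMAS AND PROOFS =====

lemma minHead_le_exit (ex en : List (Int × Int)) (h : ex ≠ []) :
    minHead ex en ≤ (ex.headD (0, 0)).1 := by
  cases ex with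
  | nil => exact absurd rfl h
  | cons a tl => cases en <;> simp [minHead]

lemma minHead_le_enter (ex en : List (Int × Int)) (h : en ≠ []) :
    minHead ex en ≤ (en.headD (0, 0)).1 := by
  cases en with
  | nil => exact absurd rfl h
  | cons a tl => cases ex <;> simp [minHead]


-- A's zip loop builds exactly the two filtered enumerations B builds
lemma buildQ_eq (l : List (Int × Int)) : ∀ i : Int,
    buildQ l i =
      ((PySem.List.enumerate l i).filterMap (fun p => if p.2.2 = 0 then none else some (p.2.1, p.1)),
       (PySem.List.enumerate l i).filterMap (fun p => if p.2.2 = 0 then some (p.2.1, p.1) else none)) := by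
  induction l with
  | nil => intro i; simp [buildQ, PySem.List.enumerate_nil]
  | cons hd tl ih =>
    intro i
    obtain ⟨t, d⟩ := hd
    by_cases hd0 : d = 0 <;>
      simp [buildQ, PySem.List.enumerate_cons, ih, hd0]

-- an idle tick of B from a state where nobody has arrived equals the jump B performs
lemma loopB_idle (ex en : List (Int × Int)) (prev cur : Int) (res : List Int)
    (hne : ¬(ex = [] ∧ en = [])) (h : cur < minHead ex en) :
    loopB ex en prev cur res = loopB ex en (-1) (cur + 1) res := by
  rw [loopB, loopB]
  by_cases hc : cur + 1 < minHead ex en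
  · simp only [if_neg hne, if_pos h, if_pos hc]
  · have heq : minHead ex en = cur + 1 := by omega
    simp only [if_neg hne, heq]
    norm_num

-- the core equivalence: A's tick loop and B's jump loop compute the same result
-- (prev is one of -1/0/1 in every reachable state)
lemma loopA_eq_loopB (ex en : List (Int × Int)) (prev cur : Int) (res : List Int)
    (hp : prev = -1 ∨ prev = 0 ∨ prev = 1) :
    loopA ex en prev cur res = loopB ex en prev cur res := by
  fun_induction loopA ex en prev cur res with
  | case1 ex en prev cur res hdone =>
    rw [loopB, if_pos hdone]
  | case2 ex en prev cur res hne hcond ih =>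
    obtain ⟨hx, hle, hC⟩ := hcond
    have hmin : ¬ cur < minHead ex en := by
      have := minHead_le_exit ex en hx; omega
    rw [loopB]
    simp only [if_neg hne, if_neg hmin]
    rw [if_pos]
    · exact ih (Or.inr (Or.inr rfl))
    · refine ⟨hx, hle, ?_⟩
      rcases hC with hC | hC | hC
      · left; omega
      · right; left; exact List.length_eq_zero_iff.mp hC
      · right; right; exact hC.1
  | case3 ex en prev cur res hne hnotexit hcond ih =>
    obtain ⟨hn, hle⟩ := hcond
    have hmin : ¬ cur < minHead ex en := by
      have := minHead_le_enter ex en hn; omega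
    rw [loopB]
    simp only [if_neg hne, if_neg hmin]
    rw [if_neg]
    · cases en with
      | nil => exact absurd rfl hn
      | cons a tl =>
        simpa using ih (Or.inr (Or.inl rfl))
    · intro ⟨hx, hle', hC⟩
      apply hnotexit
      refine ⟨hx, hle', ?_⟩
      rcases hC with hC | hC | hC
      · left; omega
      · right; left; simp [hC]
      · right; right; exact ⟨hC, by omega⟩
  | case4 ex en prev cur res hne hnotexit hnotenter ih =>
    have hmin : cur < minHead ex en := idle_lt_minHead ex en prev cur hne hnotexit hnotenter hp
    rw [ih (Or.inl rfl), loopB_idle ex en prev cur res hne hmin]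

-- ===== VERDICT (by name: the statement is the Claim_ definition above) =====
theorem getLeaveTime_spec : Claim_equal_getLeaveTime := by
  intro incomingTime direction _
  unfold Spec_getLeaveTime getLeaveTime getLeaveTime_alt
  rw [buildQ_eq]
  exact loopA_eq_loopB _ _ _ _ _ (Or.inl rfl)
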